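-- pv_equiv track=rewrite | github.com/hoeen/coding_test_training | solution_codes/programmers_스택, 큐_짝지어 제거하기_1회.py | solution
-- ===== SOURCE A (Python) =====
-- from collections import deque
--
-- def solution(s):
--     q = deque([])
--     if len(s) == 1:
--         return 0
--     po = 0
--     while po < len(s):
--         if po == len(s) - 1:
--             q.append(s[po])
--             po += 1
--         elif s[po+1] != s[po]:
--             q.append(s[po])
--             po += 1
--         else: # 다음것이 같은 문자면
--             po += 2 # 다음 다음으로 이동
--             if po > len(s)-1:
--                 break
--             while q:
--                 qnum = q.pop()
--                 if qnum == s[po]: #그다음것이 q있는것이랑 같다면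
--                     po += 1 # 그다음으로 이동
--                 else:
--                     q.append(qnum) # 다시 q에 넣음
--                     break # q랑 다음것이 다르면, 빠져나옴
--
--     return 0 if q else 1  # q가 남아 있으면 제거 못했으므로 0, q가 비었다면 다 제거한 것이므로 1
-- ===== SOURCE B (Python) =====
-- def solution(s):
--     if len(s) == 1:
--         return 0
--     while True:
--         out = []
--         i = 0
--         while i < len(s):
--             if i + 1 < len(s) and s[i] == s[i + 1]:
--                 i += 2
--             else:
--                 out.append(s[i])
--                 i += 1
--         t = ''.join(out)
--         if t == s:
--             return 1 if s == '' else 0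
--         s = t
-- ===== Notes on version B (the rewrite author's own statement) =====
-- stated objective: simpler
-- what changed: Replaces A's single-pass stack with a two-pointer cascade lookahead by repeated whole-string rewriting passes that delete all non-overlapping adjacent equal pairs until a fixpoint, returning 1 iff the fixpoint is empty; the rewriting system xx->empty is confluent, so the unique normal form matches A's stack result.
import Mathlib
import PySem

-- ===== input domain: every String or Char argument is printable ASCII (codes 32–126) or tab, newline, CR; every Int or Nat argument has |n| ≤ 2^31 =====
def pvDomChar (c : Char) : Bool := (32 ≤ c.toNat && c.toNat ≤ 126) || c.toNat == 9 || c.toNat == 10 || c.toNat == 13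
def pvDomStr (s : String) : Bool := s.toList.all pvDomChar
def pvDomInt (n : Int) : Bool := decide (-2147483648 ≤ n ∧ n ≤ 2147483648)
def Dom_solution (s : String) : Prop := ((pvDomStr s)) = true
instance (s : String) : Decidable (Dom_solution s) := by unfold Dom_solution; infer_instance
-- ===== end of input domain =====

-- B replaces A's stack-with-lookahead by repeated pair-deletion passes to a fixpoint (simpler); A raises
-- IndexError on some inputs (excluded by Pre_solution below); neither version mutates its argument.

-- ===== PORT A =====
-- A's inner `while q:` cascade: pop the stack while it matches the next characters.
-- `q` is kept top-first (Python's deque append/pop both act at the right end; only push/pop order matters,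
-- and the final result only reads emptiness of q). Returns none exactly where Python raises IndexError
-- at `s[po]` (outside Pre_solution).
def cascA (cs : List Char) (po : Nat) (q : List Char) : Option (Nat × List Char) :=
  match q with
  | [] => some (po, [])
  | qnum :: rest =>
    match cs[po]? with
    | none => none                      -- Python: IndexError
    | some c => if qnum = c then cascA cs (po + 1) rest else some (po, qnum :: rest)

-- (termination helper for loopA: the cascade never moves po backwards)
theorem cascA_le (cs : List Char) : ∀ (q : List Char) (po po' : Nat) (q' : List Char),
    cascA cs po q = some (po', q') → po ≤ po' := by
  intro q
  induction q with
  | nil => intro po po' q' h; simp [cascA] at h; omega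
  | cons qn rest ih =>
    intro po po' q' h
    simp only [cascA] at h
    cases hm : cs[po]? with
    | none => rw [hm] at h; simp at h
    | some c =>
      rw [hm] at h
      by_cases hq : qn = c
      · simp [hq] at h
        have := ih (po + 1) po' q' h
        omega
      · simp [hq] at h; omega

-- A's outer `while po < len(s):` loop.
def loopA (cs : List Char) (po : Nat) (q : List Char) : Option (List Char) :=
  if _h : po < cs.length then
    if po == cs.length - 1 then
      loopA cs (po + 1) (cs[po]! :: q)
    else if cs[po + 1]! ≠ cs[po]! then
      loopA cs (po + 1) (cs[po]! :: q)
    else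
      if po + 2 > cs.length - 1 then some q
      else
        match hc : cascA cs (po + 2) q with
        | none => none
        | some (po', q') => loopA cs po' q'
  else some q
termination_by cs.length - po
decreasing_by
  · omega
  · omega
  · have := cascA_le cs q (po + 2) po' q' hc; omega

def solution (s : String) : Int :=
  let cs := s.toList
  if cs.length == 1 then 0
  else
    match loopA cs 0 [] with
    | none => 0                         -- Python raises IndexError here; outside Pre_solution
    | some q => if q.isEmpty then 1 else 0

-- ===== PORT B =====
-- one rewriting pass of B's inner `while i < len(s):` loop: delete all non-overlapping
-- adjacent equal pairs, left to right
def onePass : List Char → List Char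
  | [] => []
  | [c] => [c]
  | a :: b :: t => if a = b then onePass t else a :: onePass (b :: t)

-- (termination helpers for reduceFix)
theorem onePass_length_le : ∀ (l : List Char), (onePass l).length ≤ l.length := by
  intro l
  induction l using onePass.induct with
  | case1 => simp [onePass]
  | case2 c => simp [onePass]
  | case3 b t ih => simp only [onePass, if_pos rfl]; simp; omega
  | case4 a b t h ih => simp only [onePass, if_neg h]; simp at ih ⊢; omega

theorem onePass_lt_of_ne : ∀ (l : List Char), onePass l ≠ l → (onePass l).length < l.length := by
  intro l
  induction l using onePass.induct with
  | case1 => simp [onePass]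
  | case2 c => simp [onePass]
  | case3 b t ih =>
    intro _
    have := onePass_length_le t
    simp only [onePass, if_pos rfl]; simp; omega
  | case4 a b t h ih =>
    intro hne
    simp only [onePass, if_neg h] at hne ⊢
    have hne' : onePass (b :: t) ≠ b :: t := by
      intro he; exact hne (by rw [he])
    have := ih hne'
    simp at this ⊢; omega

-- B's `while True:` loop: rewrite until the string stops changing
def reduceFix (l : List Char) : List Char :=
  if onePass l = l then l else reduceFix (onePass l)
termination_by l.length
decreasing_by exact onePass_lt_of_ne l (by assumption)

def solution_alt (s : String) : Int :=
  let cs := s.toList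
  if cs.length == 1 then 0
  else if reduceFix cs = [] then 1 else 0

-- ===== PRECONDITION & SPEC =====
-- canonical one-step stack reduction (used only to STATE the precondition; not a port of either program)
def redStep (st : List Char) (c : Char) : List Char :=
  match st with
  | [] => [c]
  | t :: r => if t = c then r else c :: t :: r

def redStack (l : List Char) : List Char := l.foldl redStep []

-- A raises IndexError exactly when the canonical stack reduction pops the final character,
-- leaves a non-empty stack, and the last two characters differ (A's cascade then reads past the end).
def crashBool (cs : List Char) : Bool :=
  decide (2 ≤ cs.length) && !(redStack cs).isEmpty &&
    ((redStack cs.dropLast).head? == cs.getLast?) &&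
    !(cs[cs.length - 2]? == cs[cs.length - 1]?)

-- Pre_ excludes exactly the inputs on which A raises IndexError; A returns normally everywhere else.
def Pre_solution (s : String) : Prop := crashBool s.toList = false
instance (s : String) : Decidable (Pre_solution s) := by unfold Pre_solution; infer_instance

def pvWitness_solution : String := "abba"

def Spec_solution (s : String) (out : Int) : Prop := out = solution_alt s
instance (s : String) (out : Int) : Decidable (Spec_solution s out) := by unfold Spec_solution; infer_instance

-- ===== CLAIM (what is proved, stated in full; the proofs are below) =====
def Claim_equal_solution : Prop := ∀ (s : String), Dom_solution s → Pre_solution s → Spec_solution s (solution s)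

-- ===== LEMMAS AND PROOFS =====

theorem redStep_chain (st : List Char) (c : Char) (h : List.IsChain (· ≠ ·) st) :
    List.IsChain (· ≠ ·) (redStep st c) := by
  match st with
  | [] => simp [redStep]
  | t :: r =>
    simp only [redStep]
    by_cases htc : t = c
    · simp only [if_pos htc]; exact h.tail
    · simp only [if_neg htc]
      exact List.isChain_cons_cons.mpr ⟨fun he => htc he.symm, h⟩

theorem redStep_push (st : List Char) (c : Char) (h : st.head? ≠ some c) :
    redStep st c = c :: st := by
  match st with
  | [] => simp [redStep]
  | t :: r =>
    simp only [List.head?] at h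
    have : t ≠ c := fun he => h (by rw [he])
    simp [redStep, this]

theorem redStep_pop (st q : List Char) (c : Char) (h : redStep st c = q)
    (hq : q.head? ≠ some c) : st = c :: q := by
  match st with
  | [] => simp [redStep] at h; rw [← h] at hq; simp at hq
  | t :: r =>
    simp only [redStep] at h
    by_cases htc : t = c
    · simp only [if_pos htc] at h; rw [htc, h]
    · simp only [if_neg htc] at h
      rw [← h] at hq; simp at hq

theorem redStack_take_succ (cs : List Char) (n : Nat) (h : n < cs.length) :
    redStack (cs.take (n + 1)) = redStep (redStack (cs.take n)) cs[n] := by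
  rw [List.take_add_one, redStack, redStack, List.foldl_append]
  simp [List.getElem?_eq_getElem h]

theorem head_ne (cs : List Char) (po : Nat) (q : List Char) (hpo : po < cs.length)
    (hhd : q ≠ [] → q.head? ≠ cs[po]?) : q.head? ≠ some cs[po] := by
  cases q with
  | nil => simp
  | cons a t =>
    have := hhd (by simp)
    rwa [List.getElem?_eq_getElem hpo] at this

theorem push_inv (cs : List Char) (po : Nat) (q : List Char) (hpo : po < cs.length)
    (hq : q = redStack (cs.take po)) (hhd : q ≠ [] → q.head? ≠ cs[po]?) :
    cs[po] :: q = redStack (cs.take (po + 1)) := by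
  rw [redStack_take_succ cs po hpo, ← hq, redStep_push q cs[po] (head_ne cs po q hpo hhd)]

theorem chain_push (cs : List Char) (po : Nat) (q : List Char) (hpo : po < cs.length)
    (hch : List.IsChain (· ≠ ·) q) (hhd : q ≠ [] → q.head? ≠ cs[po]?) :
    List.IsChain (· ≠ ·) (cs[po] :: q) := by
  apply List.isChain_cons.mpr
  refine ⟨?_, hch⟩
  intro y hy he
  have hqy : q.head? = some y := hy
  exact head_ne cs po q hpo hhd (by rw [hqy, he])

theorem pair_inv (cs : List Char) (po : Nat) (q : List Char) (hpo1 : po + 1 < cs.length)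
    (hcc : cs[po + 1] = cs[po]) (hq : q = redStack (cs.take po))
    (hhd : q ≠ [] → q.head? ≠ cs[po]?) :
    q = redStack (cs.take (po + 2)) := by
  rw [show po + 2 = (po + 1) + 1 from rfl, redStack_take_succ cs (po + 1) hpo1, hcc,
    ← push_inv cs po q (by omega) hq hhd]
  simp [redStep]

theorem cascA_good (cs : List Char) (hcrash : crashBool cs = false) :
    ∀ (q : List Char) (po : Nat), po ≤ cs.length →
    q = redStack (cs.take po) →
    List.IsChain (· ≠ ·) q →
    (q ≠ [] → q.head? ≠ cs[po - 1]?) →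
    (po = cs.length → q ≠ [] → cs[po - 1]? ≠ cs[po - 2]?) →
    ∃ po' q', cascA cs po q = some (po', q') ∧ po ≤ po' ∧ po' ≤ cs.length ∧
      q' = redStack (cs.take po') ∧ List.IsChain (· ≠ ·) q' ∧
      (q' ≠ [] → q'.head? ≠ cs[po']?) := by
  intro q
  induction q with
  | nil =>
    intro po hle hq hch h1 h2
    exact ⟨po, [], by simp [cascA], Nat.le_refl po, hle, hq, hch, by simp⟩
  | cons qn rest ih =>
    intro po hle hq hch h1 h2
    cases hm : cs[po]? with
    | none =>
      -- Python would raise IndexError here; refuted by ¬ crashBool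
      exfalso
      have hpo : po = cs.length := by
        have := List.getElem?_eq_none_iff.mp hm; omega
      have hne : (qn :: rest : List Char) ≠ [] := by simp
      have h1' := h1 hne
      have h2' := h2 hpo hne
      have hlen2 : 2 ≤ cs.length := by
        by_contra hlt
        push_neg at hlt
        rcases (by omega : cs.length = 0 ∨ cs.length = 1) with h0 | h0
        · rw [hpo, h0] at hq; simp [redStack] at hq
        · apply h2'; subst hpo; rw [h0]
      have hfull : qn :: rest = redStack cs := by
        rw [hq, hpo, List.take_length]
      have hstep : redStack (cs.take (cs.length - 1)) = cs[cs.length - 1] :: (qn :: rest) := by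
        have hlt : cs.length - 1 < cs.length := by omega
        have h0 := redStack_take_succ cs (cs.length - 1) hlt
        rw [show cs.length - 1 + 1 = cs.length from by omega, List.take_length] at h0
        apply redStep_pop _ _ _ (h0.symm.trans hfull.symm)
        rw [hpo] at h1'
        intro hcon
        exact h1' (by rw [hcon, List.getElem?_eq_getElem hlt])
      have hcb : crashBool cs = true := by
        unfold crashBool
        simp only [Bool.and_eq_true, decide_eq_true_eq, Bool.not_eq_true',
          beq_iff_eq, Bool.not_eq_eq_eq_not, Bool.not_true, beq_eq_false_iff_ne]
        refine ⟨⟨⟨hlen2, ?_⟩, ?_⟩, ?_⟩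
        · rw [← hfull]; simp
        · rw [List.dropLast_eq_take, hstep, List.getLast?_eq_getElem?]
          simp [List.getElem?_eq_getElem (show cs.length - 1 < cs.length from by omega)]
        · rw [hpo] at h2'
          exact fun hx => h2' hx.symm
      rw [hcrash] at hcb; exact absurd hcb (by simp)
    | some c =>
      have hpo : po < cs.length := (List.getElem?_eq_some_iff.mp hm).1
      have hcs : cs[po] = c := (List.getElem?_eq_some_iff.mp hm).2
      by_cases hqc : qn = c
      · -- pop and continue the cascade
        have hrest : rest = redStack (cs.take (po + 1)) := by
          rw [redStack_take_succ cs po hpo, ← hq, hcs, ← hqc]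
          simp [redStep]
        have h1' : rest ≠ [] → rest.head? ≠ cs[po + 1 - 1]? := by
          intro hne0
          match rest with
          | r0 :: rr =>
            have hqr : qn ≠ r0 := (List.isChain_cons_cons.mp hch).1
            simp only [Nat.add_sub_cancel, hm, List.head?]
            intro hcon
            exact hqr (hqc.trans (Option.some.inj hcon).symm)
        have h2' : po + 1 = cs.length → rest ≠ [] → cs[po + 1 - 1]? ≠ cs[po + 1 - 2]? := by
          intro hlen hne0
          simp only [Nat.add_sub_cancel]
          rw [hm]
          have hh := h1 (by simp)
          simp only [List.head?] at hh
          rw [show po + 1 - 2 = po - 1 from by omega]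
          intro hcon
          exact hh (by rw [hqc]; exact hcon)
        obtain ⟨po', q', heq, hle', hle2, hq', hch2, hhd2⟩ :=
          ih (po + 1) (by omega) hrest hch.tail h1' h2'
        refine ⟨po', q', ?_, by omega, hle2, hq', hch2, hhd2⟩
        simp only [cascA, hm, if_pos hqc]
        exact heq
      · -- stack top differs from the next character: put it back and stop
        refine ⟨po, qn :: rest, ?_, Nat.le_refl po, hle, hq, hch, ?_⟩
        · simp [cascA, hm, hqc]
        · intro _
          simp only [hm, List.head?]
          intro hcon; exact hqc (Option.some.inj hcon)

theorem loopA_good (cs : List Char) (po : Nat) (q : List Char) :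
    crashBool cs = false → po ≤ cs.length →
    q = redStack (cs.take po) → List.IsChain (· ≠ ·) q →
    (q ≠ [] → q.head? ≠ cs[po]?) →
    loopA cs po q = some (redStack cs) := by
  induction po, q using loopA.induct cs with
  | case1 po q h hlast ih =>
    intro hcrash hle hq hch hhd
    have hget : cs[po]! = cs[po] := getElem!_pos cs po h
    rw [loopA, dif_pos h, if_pos hlast]
    rw [hget] at ih ⊢
    apply ih hcrash (by omega) (push_inv cs po q h hq hhd)
      (chain_push cs po q h hch hhd)
    · intro _
      have hfin : po + 1 = cs.length := by
        have : po = cs.length - 1 := by simpa using hlast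
        omega
      rw [List.getElem?_eq_none_iff.mpr (by omega)]
      simp
  | case2 po q h hlast hne ih =>
    intro hcrash hle hq hch hhd
    have hpo1 : po + 1 < cs.length := by
      have : po ≠ cs.length - 1 := by simpa using hlast
      omega
    have hget : cs[po]! = cs[po] := getElem!_pos cs po h
    have hget1 : cs[po + 1]! = cs[po + 1] := getElem!_pos cs (po + 1) hpo1
    rw [loopA, dif_pos h, if_neg hlast, if_pos hne]
    rw [hget] at ih ⊢
    apply ih hcrash (by omega) (push_inv cs po q h hq hhd)
      (chain_push cs po q h hch hhd)
    · intro _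
      rw [List.getElem?_eq_getElem hpo1]
      simp only [List.head?]
      intro hcon
      exact hne (by rw [hget1, hget, Option.some.inj hcon])
  | case3 po q h hlast heq hbrk =>
    intro hcrash hle hq hch hhd
    have hpo1 : po + 1 < cs.length := by
      have : po ≠ cs.length - 1 := by simpa using hlast
      omega
    have hcc : cs[po + 1] = cs[po] := by
      have h' : cs[po + 1]! = cs[po]! := not_ne_iff.mp heq
      rwa [getElem!_pos cs (po + 1) hpo1, getElem!_pos cs po h] at h'
    have hqq := pair_inv cs po q hpo1 hcc hq hhd
    rw [loopA, dif_pos h, if_neg hlast, if_neg heq, if_pos hbrk, hqq,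
      show po + 2 = cs.length from by omega, List.take_length]
  | case4 po q h hlast heq hbrk hc =>
    intro hcrash hle hq hch hhd
    -- cascA returned none: Python's IndexError, impossible under ¬ crashBool
    exfalso
    have hpo1 : po + 1 < cs.length := by
      have : po ≠ cs.length - 1 := by simpa using hlast
      omega
    have hcc : cs[po + 1] = cs[po] := by
      have h' : cs[po + 1]! = cs[po]! := not_ne_iff.mp heq
      rwa [getElem!_pos cs (po + 1) hpo1, getElem!_pos cs po h] at h'
    have hqq := pair_inv cs po q hpo1 hcc hq hhd
    obtain ⟨po', q', heq', _⟩ := cascA_good cs hcrash q (po + 2) (by omega) hqq hch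
      (by
        intro hne0
        show q.head? ≠ cs[po + 1]?
        rw [List.getElem?_eq_getElem hpo1, hcc]
        intro hcon
        exact head_ne cs po q h hhd hcon)
      (by intro hfin; exfalso; omega)
    rw [hc] at heq'; exact absurd heq' (by simp)
  | case5 po q h hlast heq hbrk po' q' hc ih =>
    intro hcrash hle hq hch hhd
    have hpo1 : po + 1 < cs.length := by
      have : po ≠ cs.length - 1 := by simpa using hlast
      omega
    have hcc : cs[po + 1] = cs[po] := by
      have h' : cs[po + 1]! = cs[po]! := not_ne_iff.mp heq
      rwa [getElem!_pos cs (po + 1) hpo1, getElem!_pos cs po h] at h'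
    have hqq := pair_inv cs po q hpo1 hcc hq hhd
    obtain ⟨po2, q2, heq', hge, hle2, hq2, hch2, hhd2⟩ := cascA_good cs hcrash q (po + 2) (by omega) hqq hch
      (by
        intro hne0
        show q.head? ≠ cs[po + 1]?
        rw [List.getElem?_eq_getElem hpo1, hcc]
        intro hcon
        exact head_ne cs po q h hhd hcon)
      (by intro hfin; exfalso; omega)
    rw [hc] at heq'
    simp only [Option.some.injEq, Prod.mk.injEq] at heq'
    obtain ⟨hp1, hp2⟩ := heq'
    subst hp1; subst hp2
    rw [loopA, dif_pos h, if_neg hlast, if_neg heq, if_neg hbrk]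
    split
    next hx => rw [hc] at hx; exact absurd hx (by simp)
    next po3 q3 hx =>
      rw [hc] at hx
      simp only [Option.some.injEq, Prod.mk.injEq] at hx
      obtain ⟨h3, h4⟩ := hx
      subst h3; subst h4
      exact ih hcrash hle2 hq2 hch2 hhd2
  | case6 po q h =>
    intro hcrash hle hq hch hhd
    rw [loopA, dif_neg h, hq, show po = cs.length from by omega, List.take_length]

-- ===== B-side lemmas =====

theorem redStep_cancel (acc : List Char) (c : Char) (hch : List.IsChain (· ≠ ·) acc) :
    redStep (redStep acc c) c = acc := by
  match acc with
  | [] => simp [redStep]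
  | t :: r =>
    by_cases htc : t = c
    · subst htc
      match r with
      | [] => simp [redStep]
      | u :: v =>
        have h1 : redStep (t :: u :: v) t = u :: v := by simp [redStep]
        have htu : t ≠ u := (List.isChain_cons_cons.mp hch).1
        have h2 : redStep (u :: v) t = t :: u :: v := by
          simp only [redStep]
          rw [if_neg (fun h : u = t => htu h.symm)]
        rw [h1, h2]
    · simp [redStep, htc]

theorem onePass_foldl : ∀ (l : List Char), ∀ (acc : List Char), List.IsChain (· ≠ ·) acc →
    List.foldl redStep acc (onePass l) = List.foldl redStep acc l := by
  intro l
  induction l using onePass.induct with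
  | case1 => intro acc _; rfl
  | case2 c => intro acc _; rfl
  | case3 b t ih =>
    intro acc hch
    simp only [onePass, if_true, eq_self_iff_true, List.foldl_cons]
    rw [ih acc hch, redStep_cancel acc b hch]
  | case4 a b t h ih =>
    intro acc hch
    simp only [onePass, if_neg h, List.foldl_cons]
    exact ih (redStep acc a) (redStep_chain acc a hch)

theorem redStack_onePass (l : List Char) : redStack (onePass l) = redStack l :=
  onePass_foldl l [] (by simp)

theorem onePass_fix_chain : ∀ (l : List Char), onePass l = l → List.IsChain (· ≠ ·) l := by
  intro l
  induction l using onePass.induct with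
  | case1 => intro _; simp
  | case2 c => intro _; simp
  | case3 b t ih =>
    intro hfix
    exfalso
    have hlen := onePass_length_le t
    simp only [onePass, if_pos rfl] at hfix
    have := congrArg List.length hfix
    simp at this; omega
  | case4 a b t h ih =>
    intro hfix
    simp only [onePass, if_neg h, List.cons.injEq] at hfix
    exact List.isChain_cons_cons.mpr ⟨h, ih hfix.2⟩

theorem redStack_of_chain_aux : ∀ (l acc : List Char), List.IsChain (· ≠ ·) l →
    (∀ a c, acc.head? = some a → l.head? = some c → a ≠ c) →
    List.foldl redStep acc l = l.reverse ++ acc := by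
  intro l
  induction l with
  | nil => intro acc _ _; simp
  | cons c t ih =>
    intro acc hch hhd
    simp only [List.foldl_cons]
    rw [redStep_push acc c (by
      cases hacc : acc with
      | nil => simp
      | cons a r =>
        simp only [List.head?]
        intro hcon
        exact hhd a c (by rw [hacc]; simp) (by simp) (Option.some.inj hcon))]
    rw [ih (c :: acc) hch.tail (by
      intro a d ha hd
      have ha' : a = c := (by simpa using ha : c = a).symm
      subst ha'
      cases t with
      | nil => simp at hd
      | cons u v =>
        have huv : a ≠ u := List.isChain_cons_cons.mp hch |>.1
        have hd' : d = u := (by simpa using hd : u = d).symm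
        rw [hd']; exact huv)]
    simp

theorem redStack_of_chain (l : List Char) (h : List.IsChain (· ≠ ·) l) :
    redStack l = l.reverse := by
  have := redStack_of_chain_aux l [] h (by intro a c ha _; simp at ha)
  simpa [redStack] using this

theorem reduceFix_eq (l : List Char) : reduceFix l = (redStack l).reverse := by
  induction l using reduceFix.induct with
  | case1 l hfix =>
    rw [reduceFix, if_pos hfix,
      redStack_of_chain l (onePass_fix_chain l hfix), List.reverse_reverse]
  | case2 l hfix ih =>
    rw [reduceFix, if_neg hfix, ih, redStack_onePass]

-- ===== VERDICT (by name: the statement is the Claim_ definition above) =====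
theorem solution_spec : Claim_equal_solution := by
  intro s _ hpre
  unfold Spec_solution
  have hloop := loopA_good s.toList 0 [] hpre (by omega) (by simp [redStack]) (by simp) (by simp)
  simp only [solution, solution_alt, hloop, reduceFix_eq]
  by_cases h1 : (s.toList.length == 1) = true
  · simp [h1]
  · simp only [h1, Bool.false_eq_true, if_false]
    by_cases he : redStack s.toList = []
    · simp [he]
    · simp [he, List.isEmpty_iff]
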